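-- pv_equiv track=rewrite | github.com/whoopsjohnnie/gremlinfs | src/py/gremlinfs/gremlinfs.py | definitions
-- ===== SOURCE A (Python) =====
-- def definitions(whitelist={}, blacklist=[], defaults=None):
--     definitions = {}
--     if defaults:
--         definitions = dict(definitions, **defaults)
--     if whitelist:
--         definitions = dict(definitions, **whitelist)
--     if blacklist:
--         for key in blacklist:
--             if key in definitions:
--                 del definitions[key]
--     return definitions
-- ===== SOURCE B (Python) =====
-- def definitions(whitelist={}, blacklist=[], defaults=None):
--     d = dict(defaults or {})
--     w = dict(whitelist or {})
--     bl = set(blacklist)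
--     keys = list(d) + [k for k in w if k not in d]
--     return {k: w.get(k, d.get(k)) for k in keys if k not in bl}
-- ===== Notes on version B (the rewrite author's own statement) =====
-- stated objective: alternative
-- what changed: B never merges or deletes: it computes the ordered key sequence (defaults' keys, then whitelist-only keys), filters out blacklisted keys via a set, and builds each entry by looking the value up (whitelist first, else defaults), whereas A builds a merged dict by staged dict() copies and then deletes blacklisted keys in a loop.
import Mathlib
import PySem

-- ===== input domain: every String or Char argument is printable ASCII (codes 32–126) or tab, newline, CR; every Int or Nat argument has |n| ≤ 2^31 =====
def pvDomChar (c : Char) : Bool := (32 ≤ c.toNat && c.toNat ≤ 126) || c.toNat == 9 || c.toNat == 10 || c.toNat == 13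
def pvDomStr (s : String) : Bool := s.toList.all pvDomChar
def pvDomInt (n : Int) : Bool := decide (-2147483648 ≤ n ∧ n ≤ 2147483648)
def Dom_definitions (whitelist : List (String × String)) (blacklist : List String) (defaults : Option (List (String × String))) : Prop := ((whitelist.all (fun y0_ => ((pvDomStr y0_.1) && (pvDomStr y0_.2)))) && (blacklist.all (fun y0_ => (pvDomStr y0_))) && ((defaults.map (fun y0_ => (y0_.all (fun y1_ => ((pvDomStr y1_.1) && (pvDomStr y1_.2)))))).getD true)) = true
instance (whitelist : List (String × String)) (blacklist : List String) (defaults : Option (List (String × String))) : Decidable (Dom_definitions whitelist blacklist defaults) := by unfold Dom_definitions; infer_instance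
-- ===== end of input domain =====

-- B never merges: it computes the ordered key sequence (defaults' keys, then whitelist-only
-- keys), filters out blacklisted keys, and looks each value up (whitelist first) — instead of
-- A's staged dict merges followed by a deletion loop (objective: alternative decomposition).

-- ===== PORT A =====
def definitions (whitelist : List (String × String)) (blacklist : List String) (defaults : Option (List (String × String))) : List (String × String) :=
  let d0 : PySem.Dict String String := PySem.Dict.empty
  let d1 : PySem.Dict String String :=
    match defaults with
    | none => d0
    | some xs => if xs.isEmpty then d0 else d0.update xs      -- if defaults: dict(definitions, **defaults)
  let d2 : PySem.Dict String String :=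
    if whitelist.isEmpty then d1 else d1.update whitelist      -- if whitelist: dict(definitions, **whitelist)
  let d3 : PySem.Dict String String :=
    if blacklist.isEmpty then d2
    else blacklist.foldl (fun d k => if d.contains k then d.erase k else d) d2   -- for key in blacklist: if key in definitions: del
  d3.items

-- ===== PORT B =====
def definitions_alt (whitelist : List (String × String)) (blacklist : List String) (defaults : Option (List (String × String))) : List (String × String) :=
  let d : PySem.Dict String String := PySem.Dict.empty.update (defaults.getD [])   -- d = dict(defaults or {})
  let w : PySem.Dict String String := PySem.Dict.empty.update whitelist            -- w = dict(whitelist or {})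
  let bl : PySem.Set String := PySem.Set.ofList blacklist                          -- bl = set(blacklist)
  let keys : List String := d.keys ++ w.keys.filter (fun k => !(d.contains k))     -- keys = list(d) + [k for k in w if k not in d]
  -- dict comprehension over the distinct keys (its items are exactly the pairs built in order)
  (keys.filter (fun k => !(bl.contains k))).map
    (fun k => (k, match w.get? k with | some v => v | none => (d.get? k).getD ""))  -- w.get(k, d.get(k)); keys ⊆ d ∪ w so the "" default is never reached

-- ===== PRECONDITION & SPEC =====
def Spec_definitions (whitelist : List (String × String)) (blacklist : List String) (defaults : Option (List (String × String))) (out : List (String × String)) : Prop := out = definitions_alt whitelist blacklist defaults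
instance (whitelist : List (String × String)) (blacklist : List String) (defaults : Option (List (String × String))) (out : List (String × String)) : Decidable (Spec_definitions whitelist blacklist defaults out) := by unfold Spec_definitions; infer_instance

-- ===== CLAIM (what is proved, stated in full; the proofs are below) =====
def Claim_equal_definitions : Prop := ∀ (whitelist : List (String × String)) (blacklist : List String) (defaults : Option (List (String × String))), Dom_definitions whitelist blacklist defaults → Spec_definitions whitelist blacklist defaults (definitions whitelist blacklist defaults)

-- ===== LEMMAS AND PROOFS =====

-- A's staged merge (with its emptiness guards) equals updating empty with defaults then whitelist
theorem merge_eq (wl : List (String × String)) (df : Option (List (String × String))) :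
    (if wl.isEmpty then
        (match df with
         | none => (PySem.Dict.empty : PySem.Dict String String)
         | some xs => if xs.isEmpty then PySem.Dict.empty else PySem.Dict.empty.update xs)
      else
        (match df with
         | none => (PySem.Dict.empty : PySem.Dict String String)
         | some xs => if xs.isEmpty then PySem.Dict.empty else PySem.Dict.empty.update xs).update wl)
      = (PySem.Dict.empty.update (df.getD [])).update wl := by
  cases df with
  | none => cases wl <;> simp [PySem.Dict.update]
  | some xs =>
    cases hxs : xs.isEmpty <;> simp_all [List.isEmpty_iff] <;>
      cases wl <;> simp [PySem.Dict.update]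

-- one deletion step of A's loop: items become the items with key ≠ b (both branches)
theorem erase_step_items (d : PySem.Dict String String) (b : String) :
    (if d.contains b then d.erase b else d).items
      = d.items.filter (fun p => !(p.1 == b)) := by
  split
  · rfl
  · next h =>
    have hb : b ∉ d.keys := by
      intro hm
      exact absurd ((PySem.Dict.contains_iff_mem_keys d b).mpr hm) (by simp [h])
    symm
    apply List.filter_eq_self.mpr
    intro p hp
    have hpk : p.1 ∈ d.keys := by
      simp only [PySem.Dict.keys]
      exact List.mem_map_of_mem hp
    simp only [Bool.not_eq_eq_eq_not, Bool.not_true, beq_eq_false_iff_ne, ne_eq]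
    intro hpe
    exact hb (hpe ▸ hpk)

-- A's deletion loop over the blacklist equals one filter over the items
theorem eraseLoop_items (bl : List String) (d : PySem.Dict String String) :
    (bl.foldl (fun d k => if d.contains k then d.erase k else d) d).items
      = d.items.filter (fun p => !(bl.contains p.1)) := by
  induction bl generalizing d with
  | nil => simp
  | cons b t ih =>
    simp only [List.foldl_cons]
    rw [ih, erase_step_items, List.filter_filter]
    apply List.filter_congr
    intro p _
    simp [Bool.not_or, Bool.and_comm, beq_eq_decide]

-- the guarded deletion phase as one filter
theorem delete_phase (bl : List String) (d : PySem.Dict String String) :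
    (if bl.isEmpty then d
      else bl.foldl (fun d k => if d.contains k then d.erase k else d) d).items
      = d.items.filter (fun p => !(bl.contains p.1)) := by
  split
  · next h =>
    have : bl = [] := List.isEmpty_iff.mp h
    subst this
    simp
  · exact eraseLoop_items bl d

-- membership in set(blacklist) equals membership in the blacklist
theorem setOfList_contains_eq (bl : List String) (x : String) :
    (PySem.Set.ofList bl).contains x = bl.contains x := by
  simp only [PySem.Set.contains]
  apply Bool.eq_iff_iff.mpr
  simp [PySem.Set.mem_ofList]

-- lookup in D.update wl: whitelist's value first, else D's value
theorem get?_update_or (wl : List (String × String)) (D : PySem.Dict String String) (k : String) :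
    (D.update wl).get? k = ((PySem.Dict.empty.update wl).get? k).or (D.get? k) := by
  induction wl generalizing D with
  | nil => simp [PySem.Dict.update, PySem.Dict.get?_empty]
  | cons p t ih =>
    show ((D.insert p.1 p.2).update t).get? k = _
    rw [ih]
    show _ = (((PySem.Dict.empty.insert p.1 p.2).update t).get? k).or (D.get? k)
    rw [ih (PySem.Dict.empty.insert p.1 p.2)]
    rw [Option.or_assoc]
    congr 1
    rw [PySem.Dict.get?_insert, PySem.Dict.get?_insert]
    split <;> simp [PySem.Dict.get?_empty]

-- keys of D.update wl: D's keys, then the whitelist keys not already in D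
theorem keys_update_append (wl : List (String × String)) (D : PySem.Dict String String) :
    (D.update wl).keys
      = D.keys ++ ((PySem.Dict.empty.update wl).keys).filter (fun k => !(D.contains k)) := by
  induction wl generalizing D with
  | nil => simp [PySem.Dict.update]
  | cons p t ih =>
    show ((D.insert p.1 p.2).update t).keys = _
    rw [ih]
    show _ = D.keys ++ (((PySem.Dict.empty.insert p.1 p.2).update t).keys).filter _
    rw [ih (PySem.Dict.empty.insert p.1 p.2)]
    by_cases hc : D.contains p.1 = true
    · rw [PySem.Dict.keys_insert_of_contains _ _ hc]
      rw [List.filter_append, List.filter_filter]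
      have h1 : (PySem.Dict.empty.insert p.1 p.2).keys.filter (fun k => !(D.contains k)) = [] := by
        simp [PySem.Dict.keys_insert_of_not_contains, PySem.Dict.contains_empty,
              PySem.Dict.keys_empty, hc]
      rw [h1, List.nil_append]
      congr 1
      apply List.filter_congr
      intro k _
      simp [PySem.Dict.contains_insert, PySem.Dict.contains_empty, Bool.not_or, Bool.and_comm]
    · have hc' : D.contains p.1 = false := by simpa using hc
      rw [PySem.Dict.keys_insert_of_not_contains _ _ hc']
      rw [List.filter_append, List.filter_filter]
      have h1 : (PySem.Dict.empty.insert p.1 p.2).keys.filter (fun k => !(D.contains k)) = [p.1] := by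
        simp [PySem.Dict.keys_insert_of_not_contains, PySem.Dict.contains_empty,
              PySem.Dict.keys_empty, hc']
      rw [h1, List.append_assoc]
      congr 1
      congr 1
      apply List.filter_congr
      intro k _
      simp [PySem.Dict.contains_insert, PySem.Dict.contains_empty, Bool.not_or, Bool.and_comm]

-- ===== VERDICT (by name: the statement is the Claim_ definition above) =====
theorem definitions_spec : Claim_equal_definitions := by
  intro wl bl df _
  show definitions wl bl df = definitions_alt wl bl df
  simp only [definitions, definitions_alt]
  rw [delete_phase, merge_eq]
  have hnd : ((PySem.Dict.empty.update (df.getD [])).update wl).keys.Nodup := by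
    apply PySem.Dict.nodup_keys_update
    apply PySem.Dict.nodup_keys_update
    simp [PySem.Dict.keys_empty]
  simp only [setOfList_contains_eq]
  rw [PySem.Dict.items_eq_map_keys _ hnd "", List.filter_map, keys_update_append]
  simp only [Function.comp_def]
  apply List.map_congr_left
  intro k _
  rw [PySem.Dict.getD_eq_get?_getD, get?_update_or]
  cases (PySem.Dict.empty.update wl).get? k <;> simp
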